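-- pv_equiv track=rewrite | github.com/jcolinpatrick/kryptos | scripts/grille/e_morse_grid14_overlay.py | overlay_on_grid
-- ===== SOURCE A (Python) =====
-- def overlay_on_grid(binary_seq, offset, ct_len=97, keep_val=1):
--     """Overlay binary sequence on positions 0..ct_len-1 starting at offset.
--
--     keep_val: which binary value means "keep" (not null).
--     Returns set of null positions, or None if constraints violated.
--     """
--     null_positions = set()
--     for pos in range(ct_len):
--         idx = offset + pos
--         if idx < 0 or idx >= len(binary_seq):
--             # Out of bounds — treat as null or keep based on position
--             bit = 1 - keep_val  # null
--         else:
--             bit = binary_seq[idx]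
--
--         if bit != keep_val:
--             null_positions.add(pos)
--
--     return null_positions
-- ===== SOURCE B (Python) =====
-- def overlay_on_grid(binary_seq, offset, ct_len=97, keep_val=1):
--     """Windowed-removal reformulation: start with all positions null,
--     then discard the in-window positions whose bit says "keep"."""
--     lo = max(0, -offset)
--     hi = min(ct_len, len(binary_seq) - offset)
--     nulls = set(range(ct_len))
--     for pos in range(lo, hi):
--         if binary_seq[offset + pos] == keep_val:
--             nulls.discard(pos)
--     return nulls
-- ===== Notes on version B (the rewrite author's own statement) =====
-- stated objective: alternative
-- what changed: B computes the in-bounds window [lo,hi) arithmetically, starts from the full set range(ct_len) and discards the kept in-window positions, instead of A's per-position bounds check with sentinel bit and accumulation of nulls.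
import Mathlib
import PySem

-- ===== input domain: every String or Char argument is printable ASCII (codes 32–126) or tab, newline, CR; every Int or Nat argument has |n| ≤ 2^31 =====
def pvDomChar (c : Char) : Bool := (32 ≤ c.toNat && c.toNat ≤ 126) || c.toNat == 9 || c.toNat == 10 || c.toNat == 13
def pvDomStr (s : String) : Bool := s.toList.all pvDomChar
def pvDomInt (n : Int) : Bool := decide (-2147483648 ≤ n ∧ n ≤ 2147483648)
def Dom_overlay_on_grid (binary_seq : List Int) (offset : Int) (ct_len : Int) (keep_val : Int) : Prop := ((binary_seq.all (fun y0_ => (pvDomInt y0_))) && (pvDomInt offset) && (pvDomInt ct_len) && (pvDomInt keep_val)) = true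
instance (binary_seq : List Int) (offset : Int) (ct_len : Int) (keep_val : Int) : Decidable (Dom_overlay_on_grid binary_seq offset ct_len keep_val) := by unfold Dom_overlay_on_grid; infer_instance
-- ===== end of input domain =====

-- ===== PORT A =====
-- A: for each pos in range(ct_len), compute bit (sentinel 1-keep_val out of bounds) and add pos to the null set when bit != keep_val.
def overlay_on_grid (binary_seq : List Int) (offset : Int) (ct_len : Int) (keep_val : Int) : List Int :=
  (PySem.List.pyRange 0 ct_len 1).foldl
    (fun null_positions pos =>
      let idx := offset + pos
      let bit : Int :=
        if idx < 0 ∨ (binary_seq.length : Int) ≤ idx then 1 - keep_val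
        else PySem.List.pyGetD binary_seq idx 0   -- idx checked in range just above
      if bit ≠ keep_val then PySem.Set.add null_positions pos else null_positions)
    PySem.Set.empty

-- ===== PORT B =====
-- B: arithmetic window [lo,hi); start from set(range(ct_len)) and discard kept in-window positions.
def overlay_on_grid_alt (binary_seq : List Int) (offset : Int) (ct_len : Int) (keep_val : Int) : List Int :=
  let lo := max 0 (-offset)
  let hi := min ct_len ((binary_seq.length : Int) - offset)
  (PySem.List.pyRange lo hi 1).foldl
    (fun nulls pos =>
      if PySem.List.pyGetD binary_seq (offset + pos) 0 == keep_val  -- offset+pos in range by the window bounds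
      then PySem.Set.discard nulls pos else nulls)
    (PySem.Set.ofList (PySem.List.pyRange 0 ct_len 1))

-- ===== PRECONDITION & SPEC =====
def Spec_overlay_on_grid (binary_seq : List Int) (offset : Int) (ct_len : Int) (keep_val : Int) (out : List Int) : Prop := out = overlay_on_grid_alt binary_seq offset ct_len keep_val
instance (binary_seq : List Int) (offset : Int) (ct_len : Int) (keep_val : Int) (out : List Int) : Decidable (Spec_overlay_on_grid binary_seq offset ct_len keep_val out) := by unfold Spec_overlay_on_grid; infer_instance

-- ===== CLAIM (what is proved, stated in full; the proofs are below) =====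
def Claim_equal_overlay_on_grid : Prop := ∀ (binary_seq : List Int) (offset : Int) (ct_len : Int) (keep_val : Int), Dom_overlay_on_grid binary_seq offset ct_len keep_val → Spec_overlay_on_grid binary_seq offset ct_len keep_val (overlay_on_grid binary_seq offset ct_len keep_val)

-- ===== LEMMAS AND PROOFS =====


-- A's accumulation loop builds exactly the filter of the traversed list (no duplicate adds on a Nodup list).
theorem pvFoldlAddFilter (p : Int → Prop) [DecidablePred p] :
    ∀ (l : List Int) (s0 : List Int), l.Nodup → (∀ x ∈ l, x ∉ s0) →
      l.foldl (fun s x => if p x then PySem.Set.add s x else s) s0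
        = s0 ++ l.filter (fun x => decide (p x)) := by
  intro l
  induction l with
  | nil => intro s0 _ _; simp
  | cons x l ih =>
    intro s0 hnd hdis
    simp only [List.foldl_cons]
    by_cases hp : p x
    · have hx : x ∉ s0 := hdis x (by simp)
      have hadd : PySem.Set.add s0 x = s0 ++ [x] := by
        simp [PySem.Set.add, hx]
      rw [if_pos hp, hadd, ih (s0 ++ [x]) hnd.of_cons]
      · simp [hp]
      · intro y hy
        simp only [List.mem_append, List.mem_singleton]
        rintro (h | rfl)
        · exact hdis y (by simp [hy]) h
        · exact (List.nodup_cons.mp hnd).1 hy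
    · rw [if_neg hp, ih s0 hnd.of_cons (fun y hy => hdis y (by simp [hy]))]
      simp [hp]

-- B's removal loop is a filter of the initial set by "not (in the window and kept)".
theorem pvFoldlDiscardFilter (q : Int → Bool) :
    ∀ (w : List Int) (s0 : List Int),
      w.foldl (fun s x => if q x then PySem.Set.discard s x else s) s0
        = s0.filter (fun y => !(w.contains y && q y)) := by
  intro w
  induction w with
  | nil => intro s0; simp
  | cons x w ih =>
    intro s0
    simp only [List.foldl_cons]
    by_cases hq : q x = true
    · rw [if_pos hq, ih]
      show (List.filter _ s0).filter _ = _
      rw [List.filter_filter]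
      apply List.filter_congr
      intro y _
      by_cases hyx : y = x <;> simp [hyx, hq]
    · rw [if_neg (by simp [hq]), ih]
      apply List.filter_congr
      intro y _
      by_cases hyx : y = x <;> simp [hyx, hq]

-- ===== VERDICT (by name: the statement is the Claim_ definition above) =====
theorem overlay_on_grid_spec : Claim_equal_overlay_on_grid := by
  intro binary_seq offset ct_len keep_val _
  unfold Spec_overlay_on_grid overlay_on_grid overlay_on_grid_alt
  show (PySem.List.pyRange 0 ct_len 1).foldl
        (fun s pos =>
          if (if offset + pos < 0 ∨ (binary_seq.length : Int) ≤ offset + pos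
                then 1 - keep_val else PySem.List.pyGetD binary_seq (offset + pos) 0) ≠ keep_val
          then PySem.Set.add s pos else s)
        PySem.Set.empty
      = (PySem.List.pyRange (max 0 (-offset)) (min ct_len ((binary_seq.length : Int) - offset)) 1).foldl
        (fun s pos =>
          if PySem.List.pyGetD binary_seq (offset + pos) 0 == keep_val
          then PySem.Set.discard s pos else s)
        (PySem.Set.ofList (PySem.List.pyRange 0 ct_len 1))
  rw [PySem.Set.ofList_eq_self_of_nodup _ (PySem.List.nodup_pyRange_one 0 ct_len)]
  rw [pvFoldlAddFilter
        (fun pos => (if offset + pos < 0 ∨ (binary_seq.length : Int) ≤ offset + pos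
                      then 1 - keep_val else PySem.List.pyGetD binary_seq (offset + pos) 0) ≠ keep_val)
        (PySem.List.pyRange 0 ct_len 1) PySem.Set.empty
        (PySem.List.nodup_pyRange_one 0 ct_len) (by intro x _ h; simp [PySem.Set.empty] at h)]
  rw [pvFoldlDiscardFilter (fun pos => PySem.List.pyGetD binary_seq (offset + pos) 0 == keep_val)]
  show List.filter _ _ = _
  apply List.filter_congr
  intro y hy
  have hy' := PySem.List.mem_pyRange_one.mp hy
  by_cases hb : offset + y < 0 ∨ (binary_seq.length : Int) ≤ offset + y
  · have hc : (PySem.List.pyRange (max 0 (-offset)) (min ct_len ((binary_seq.length : Int) - offset)) 1).contains y = false := by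
      rw [Bool.eq_false_iff]
      intro hcc
      have := PySem.List.mem_pyRange_one.mp (List.contains_iff_mem.mp hcc)
      omega
    rw [hc]
    simp only [Bool.false_and, Bool.not_false, if_pos hb, decide_eq_true_eq]
    omega
  · have hc : (PySem.List.pyRange (max 0 (-offset)) (min ct_len ((binary_seq.length : Int) - offset)) 1).contains y = true :=
      List.contains_iff_mem.mpr (PySem.List.mem_pyRange_one.mpr (by omega))
    rw [hc]
    simp only [Bool.true_and, if_neg hb]
    by_cases h : PySem.List.pyGetD binary_seq (offset + y) 0 = keep_val <;> simp [h]
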